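-- pv_equiv track=rewrite | github.com/ssabum/note | algorithm/class/d2/11457_gravity/sol1.py | check_gravity
-- ===== SOURCE A (Python) =====
-- def check_gravity(numbers):
--     # 최대 중력 0으로 초기화
--     max_gravity = 0
--     # 숫자들을 돌며
--     for i in range(len(numbers)):
--         # 만약 블럭이 없으면 통과
--         if numbers[i] == 0:
--             continue
--         # 최대 중력치 설정
--         my_gravity = len(numbers) - i - 1
--         # 오른쪽의 블록들 확인(회전시 자기보다 긴 블록이 있을 경우 중력이 1씩 감소)
--         for j in range(i+1, len(numbers)):
--             if numbers[i] <= numbers[j]: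
--                 my_gravity -= 1
--         # 만약 각 위치의 중력들이 최대 중력보다 크면 갱신
--         if my_gravity > max_gravity:
--             max_gravity = my_gravity
--     # 최대 중력값 리턴
--     return max_gravity
-- ===== SOURCE B (Python) =====
-- def check_gravity(numbers):
--     # Right-to-left sweep keeping the already-seen suffix in a sorted list;
--     # a hand-written bisect_left gives the count of strictly shorter blocks to the right.
--     best = 0
--     seen = []
--     for x in reversed(numbers):
--         lo, hi = 0, len(seen)
--         while lo < hi:
--             mid = (lo + hi) // 2
--             if seen[mid] < x:
--                 lo = mid + 1
--             else:
--                 hi = mid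
--         if x != 0 and lo > best:
--             best = lo
--         seen.insert(lo, x)
--     return best
-- ===== Notes on version B (the rewrite author's own statement) =====
-- stated objective: faster
-- what changed: Replaced the nested rescans of the remaining array with a single right-to-left sweep that keeps the seen suffix in a sorted list and binary-searches (hand-written bisect_left) the count of strictly smaller elements.
import Mathlib
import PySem

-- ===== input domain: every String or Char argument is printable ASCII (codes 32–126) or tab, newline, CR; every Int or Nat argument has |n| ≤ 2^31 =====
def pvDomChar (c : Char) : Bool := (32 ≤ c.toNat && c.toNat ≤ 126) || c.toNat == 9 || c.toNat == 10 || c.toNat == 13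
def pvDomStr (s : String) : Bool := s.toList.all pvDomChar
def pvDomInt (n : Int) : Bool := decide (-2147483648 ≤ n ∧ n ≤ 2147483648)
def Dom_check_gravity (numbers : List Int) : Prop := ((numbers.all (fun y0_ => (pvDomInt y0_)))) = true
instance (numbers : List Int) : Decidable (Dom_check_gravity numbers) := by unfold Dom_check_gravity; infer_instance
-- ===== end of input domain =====

-- B replaces A's nested O(n^2) rescans by one right-to-left sweep over a sorted "seen" list
-- with a hand-written bisect_left; return values proved equal on all inputs.

-- ===== PORT A =====
-- inner loop: 'for j in range(i+1, len(numbers)): if numbers[i] <= numbers[j]: my_gravity -= 1'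
def pvInnerA (numbers : List Int) (x : Int) (i : Int) : Int :=
  (PySem.List.pyRange (i + 1) (numbers.length : Int) 1).foldl
    (fun g j => if x ≤ PySem.List.pyGetD numbers j 0 then g - 1 else g)
    ((numbers.length : Int) - i - 1)

-- outer loop body: skip zero blocks, else compute my_gravity and update the running max
def pvBodyA (numbers : List Int) (mx : Int) (i : Int) : Int :=
  let x := PySem.List.pyGetD numbers i 0
  if x = 0 then mx
  else
    let g := pvInnerA numbers x i
    if g > mx then g else mx

def check_gravity (numbers : List Int) : Int :=
  (PySem.List.pyRange 0 (numbers.length : Int) 1).foldl (pvBodyA numbers) 0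

-- ===== PORT B =====
-- hand-written bisect_left loop of Source B: 'while lo < hi: mid = (lo+hi)//2; …'
def pvBL (seen : List Int) (x : Int) (lo hi : Nat) : Nat :=
  if lo < hi then
    let mid := (lo + hi) / 2  -- Python's (lo+hi)//2: Nat division is exact here (both operands nonnegative)
    if PySem.List.pyGetD seen (mid : Int) 0 < x then pvBL seen x (mid + 1) hi
    else pvBL seen x lo mid
  else lo
termination_by hi - lo
decreasing_by all_goals omega

-- one iteration of Source B's 'for x in reversed(numbers)' over the state (best, seen)
def pvStep (st : Int × List Int) (x : Int) : Int × List Int :=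
  let lo := pvBL st.2 x 0 st.2.length
  (if x ≠ 0 ∧ (lo : Int) > st.1 then (lo : Int) else st.1,
   PySem.List.insert st.2 (lo : Int) x)

def check_gravity_alt (numbers : List Int) : Int :=
  (numbers.reverse.foldl pvStep (0, [])).1

-- ===== PRECONDITION & SPEC =====
def Spec_check_gravity (numbers : List Int) (out : Int) : Prop := out = check_gravity_alt numbers
instance (numbers : List Int) (out : Int) : Decidable (Spec_check_gravity numbers out) := by unfold Spec_check_gravity; infer_instance

-- ===== CLAIM (what is proved, stated in full; the proofs are below) =====
def Claim_equal_check_gravity : Prop := ∀ (numbers : List Int), Dom_check_gravity numbers → Spec_check_gravity numbers (check_gravity numbers)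

-- ===== LEMMAS AND PROOFS =====

-- candidate gravity of a block x given the multiset s of blocks to its right (0 for an absent block)
def pvCand (x : Int) (s : List Int) : Int :=
  if x = 0 then 0 else ((s.countP (fun y => decide (y < x)) : Nat) : Int)

-- candidates of the elements of l, each against its suffix within l plus an outer context s
def pvCandsC : List Int → List Int → List Int
  | [], _ => []
  | x :: t, s => pvCand x (t ++ s) :: pvCandsC t s

-- candidates in B's processing order: context s grows as elements are processed
def pvCandsR : List Int → List Int → List Int
  | [], _ => []
  | x :: r, s => pvCand x s :: pvCandsR r (x :: s)

lemma pvCand_perm {s s' : List Int} (x : Int) (h : s.Perm s') :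
    pvCand x s = pvCand x s' := by
  unfold pvCand; rw [h.countP_eq]

lemma pvCandsR_perm {s s' : List Int} (r : List Int) (h : s.Perm s') :
    pvCandsR r s = pvCandsR r s' := by
  induction r generalizing s s' with
  | nil => rfl
  | cons x r ih => simp [pvCandsR, pvCand_perm x h, ih (h.cons x)]

lemma pvCandsR_append (u v s : List Int) :
    pvCandsR (u ++ v) s = pvCandsR u s ++ pvCandsR v (u.reverse ++ s) := by
  induction u generalizing s with
  | nil => simp [pvCandsR]
  | cons x u ih =>
      simp only [List.cons_append, pvCandsR, ih (x :: s), List.reverse_cons]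
      simp

lemma pvCandsR_reverse (l s : List Int) :
    pvCandsR l.reverse s = (pvCandsC l s).reverse := by
  induction l generalizing s with
  | nil => rfl
  | cons x t ih =>
      simp only [List.reverse_cons, pvCandsR_append, ih, pvCandsC]
      simp [pvCandsR]

-- A's inner loop counts the strictly smaller elements of the suffix
lemma pvFold_sub (x : Int) (t : List Int) : ∀ init : Int,
    t.foldl (fun g y => if x ≤ y then g - 1 else g) init
      = init - ((t.countP (fun y => decide (x ≤ y)) : Nat) : Int) := by
  induction t with
  | nil => intro init; simp
  | cons y t ih =>
      intro init
      by_cases h : x ≤ y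
      · simp [h, ih]; ring
      · simp [h, ih]

lemma pvInnerA_eq (p t : List Int) (x : Int) :
    pvInnerA (p ++ x :: t) x (p.length : Int)
      = ((t.countP (fun y => decide (y < x)) : Nat) : Int) := by
  unfold pvInnerA
  have h1 : ((p.length : Int) + 1) = ((p.length + 1 : Nat) : Int) := by push_cast; ring
  rw [h1, PySem.List.foldl_pyRange_pyGetD' (p ++ x :: t) 0
    (fun g y => if x ≤ y then g - 1 else g) _ (by positivity)]
  have hd : ((((p.length + 1 : Nat)) : Int)).toNat = p.length + 1 := Int.toNat_natCast _
  have hdrop : (p ++ x :: t).drop (p.length + 1) = t := by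
    simp
  rw [hd, hdrop, pvFold_sub]
  have hle : t.countP (fun y => decide (x ≤ y)) + t.countP (fun y => decide (y < x))
      = t.length := by
    have h := List.length_eq_countP_add_countP (l := t) (p := fun y => decide (x ≤ y))
    rw [h]
    congr 1
    apply List.countP_congr
    intro y _
    simp
  have hlen : ((p ++ x :: t).length : Int) = (p.length : Int) + (t.length : Int) + 1 := by
    simp; ring
  omega

lemma pvGetD_mid (p t : List Int) (x d : Int) :
    PySem.List.pyGetD (p ++ x :: t) ((p.length : Nat) : Int) d = x := by
  rw [PySem.List.pyGetD_natCast]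
  rw [List.getD_eq_getElem?_getD, List.getElem?_append_right (by omega)]
  simp

-- A's outer loop is a running max over the candidate list
lemma pvOuterA (l : List Int) : ∀ (p : List Int) (mx : Int), 0 ≤ mx →
    (PySem.List.pyRange (p.length : Int) ((p.length : Int) + (l.length : Int)) 1).foldl
        (pvBodyA (p ++ l)) mx
      = (pvCandsC l []).foldl max mx := by
  induction l with
  | nil => intro p mx _; simp [pvCandsC]
  | cons x t ih =>
      intro p mx hmx
      have hcons : PySem.List.pyRange (p.length : Int) ((p.length : Int) + (((x :: t).length : Nat) : Int)) 1
          = (p.length : Int) :: PySem.List.pyRange ((p.length : Int) + 1)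
              ((p.length : Int) + (((x :: t).length : Nat) : Int)) 1 :=
        PySem.List.pyRange_one_cons (by simp [List.length_cons])
      rw [hcons, List.foldl_cons]
      have hbody : pvBodyA (p ++ x :: t) mx (p.length : Int) = max mx (pvCand x (t ++ [])) := by
        unfold pvBodyA pvCand
        rw [pvGetD_mid]
        by_cases hx : x = 0
        · simp [hx, max_eq_left hmx]
        · simp only [hx, if_false, List.append_nil]
          rw [pvInnerA_eq]
          rcases le_or_gt ((t.countP (fun y => decide (y < x)) : Nat) : Int) mx with h | h
          · rw [if_neg (by omega), max_eq_left h]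
          · rw [if_pos h, max_eq_right (le_of_lt h)]
      rw [hbody]
      have harg : ((p.length : Int) + 1) = (((p ++ [x]).length : Nat) : Int) := by
        simp
      have harg2 : ((p.length : Int) + (((x :: t).length : Nat) : Int))
          = (((p ++ [x]).length : Nat) : Int) + ((t.length : Nat) : Int) := by
        simp; ring
      have hl : p ++ x :: t = (p ++ [x]) ++ t := by simp
      rw [harg, harg2, hl, ih (p ++ [x]) _ (le_max_of_le_left hmx)]
      rfl

-- countP of (· < x) over a list whose k-th element is < x exactly for k < lo
lemma pvCountP_boundary (s : List Int) (x : Int) (lo : Nat) (hlo : lo ≤ s.length)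
    (h1 : ∀ k (hk : k < s.length), k < lo → s[k] < x)
    (h2 : ∀ k (hk : k < s.length), lo ≤ k → x ≤ s[k]) :
    s.countP (fun y => decide (y < x)) = lo := by
  have hsplit : s.countP (fun y => decide (y < x))
      = (s.take lo).countP (fun y => decide (y < x))
        + (s.drop lo).countP (fun y => decide (y < x)) := by
    conv_lhs => rw [← List.take_append_drop lo s]
    rw [List.countP_append]
  rw [hsplit]
  have htake : (s.take lo).countP (fun y => decide (y < x)) = lo := by
    have hall : ∀ y ∈ s.take lo, (fun y => decide (y < x)) y = true := by
      intro y hy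
      obtain ⟨k, hk, hky⟩ := List.getElem_of_mem hy
      have hlt : k < lo := by simp [List.length_take] at hk; omega
      have hky' : s[k]'(by omega) = y := by
        rw [← hky]; exact (List.getElem_take).symm
      simp only [decide_eq_true_eq]
      rw [← hky']
      exact h1 k (by omega) hlt
    rw [List.countP_eq_length.mpr hall, List.length_take]
    omega
  have hdrop : (s.drop lo).countP (fun y => decide (y < x)) = 0 := by
    rw [List.countP_eq_zero]
    intro y hy
    obtain ⟨k, hk, hky⟩ := List.getElem_of_mem hy
    have hklen : lo + k < s.length := by simp [List.length_drop] at hk; omega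
    have hky' : s[lo + k]'hklen = y := by rw [← hky]; exact List.getElem_drop.symm
    have := h2 (lo + k) hklen (by omega)
    rw [hky'] at this
    simp only [decide_eq_true_eq]
    omega
  omega

-- pvBL on a sorted list, with the loop invariant, returns the count of strictly smaller elements
lemma pvBL_spec (s : List Int) (x : Int) (hs : s.Pairwise (· ≤ ·)) :
    ∀ (lo hi : Nat), lo ≤ hi → hi ≤ s.length →
    (∀ k (hk : k < s.length), k < lo → s[k] < x) →
    (∀ k (hk : k < s.length), hi ≤ k → x ≤ s[k]) →
    pvBL s x lo hi = s.countP (fun y => decide (y < x)) := by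
  intro lo hi
  induction hn : hi - lo using Nat.strong_induction_on generalizing lo hi with
  | _ n ihn =>
  intro hlohi hhi h1 h2
  by_cases hlt : lo < hi
  · rw [pvBL, if_pos hlt]
    have hmid1 : lo ≤ (lo + hi) / 2 := by omega
    have hmid2 : (lo + hi) / 2 < hi := by omega
    have hmlen : (lo + hi) / 2 < s.length := by omega
    have hget : PySem.List.pyGetD s (((lo + hi) / 2 : Nat) : Int) 0 = s[(lo + hi) / 2] := by
      rw [PySem.List.pyGetD_natCast, List.getD_eq_getElem?_getD, List.getElem?_eq_getElem hmlen]
      rfl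
    have hpair := List.pairwise_iff_getElem.mp hs
    by_cases hc : s[(lo + hi) / 2] < x
    · rw [if_pos (by rw [hget]; exact hc)]
      refine ihn (hi - ((lo + hi) / 2 + 1)) (by omega) _ _ rfl (by omega) hhi ?_ h2
      intro k hk hklt
      rcases Nat.lt_or_ge k ((lo + hi) / 2) with h | h
      · exact lt_of_le_of_lt (hpair k ((lo + hi) / 2) hk hmlen h) hc
      · have hke : k = (lo + hi) / 2 := by omega
        subst hke; exact hc
    · rw [if_neg (by rw [hget]; exact hc)]
      refine ihn ((lo + hi) / 2 - lo) (by omega) _ _ rfl (by omega) (by omega) h1 ?_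
      intro k hk hge
      rcases Nat.lt_or_ge k hi with h | h
      · have hx : x ≤ s[(lo + hi) / 2] := by omega
        rcases Nat.eq_or_lt_of_le hge with he | hlt'
        · subst he; exact hx
        · exact le_trans hx (hpair ((lo + hi) / 2) k hmlen hk hlt')
      · exact h2 k hk h
  · rw [pvBL, if_neg hlt]
    have hle : lo = hi := by omega
    subst hle
    exact (pvCountP_boundary s x lo hhi h1 h2).symm

lemma pvBL_cnt (s : List Int) (x : Int) (hs : s.Pairwise (· ≤ ·)) :
    pvBL s x 0 s.length = s.countP (fun y => decide (y < x)) :=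
  pvBL_spec s x hs 0 s.length (Nat.zero_le _) le_rfl
    (fun _ _ h => absurd h (Nat.not_lt_zero _)) (fun _ hk h => absurd hk (by omega))

-- inserting at the count position keeps the list sorted, and is a permutation of x :: s
lemma pvInsert_sorted (x : Int) (s : List Int) (hs : s.Pairwise (· ≤ ·)) :
    (s.take (s.countP (fun y => decide (y < x))) ++
      x :: s.drop (s.countP (fun y => decide (y < x)))).Pairwise (· ≤ ·) := by
  induction s with
  | nil => simp
  | cons y t ih =>
      rw [List.pairwise_cons] at hs
      by_cases hy : y < x
      · have : (y :: t).countP (fun z => decide (z < x)) = t.countP (fun z => decide (z < x)) + 1 := by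
          rw [List.countP_cons]; simp [hy]
        rw [this]
        simp only [List.take_succ_cons, List.drop_succ_cons, List.cons_append]
        rw [List.pairwise_cons]
        constructor
        · intro z hz
          rcases List.mem_append.mp hz with h | h
          · exact hs.1 z (List.mem_of_mem_take h)
          · rcases List.mem_cons.mp h with h | h
            · omega
            · exact hs.1 z (List.mem_of_mem_drop h)
        · exact ih hs.2
      · have hcnt : (y :: t).countP (fun z => decide (z < x)) = 0 := by
          rw [List.countP_eq_zero]
          intro z hz
          rcases List.mem_cons.mp hz with h | h
          · subst h; simpa using hy
          · have := hs.1 z h; simp; omega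
        rw [hcnt]
        simp only [List.take_zero, List.drop_zero, List.nil_append]
        rw [List.pairwise_cons]
        exact ⟨fun z hz => by
          rcases List.mem_cons.mp hz with h | h
          · subst h; omega
          · have := hs.1 z h; omega,
          List.pairwise_cons.mpr hs⟩

lemma pvInsert_perm (x : Int) (s : List Int) (r : Nat) :
    (s.take r ++ x :: s.drop r).Perm (x :: s) := by
  have := List.perm_middle (a := x) (l₁ := s.take r) (l₂ := s.drop r)
  simpa using this

-- B's fold is a running max over the candidates in processing order
lemma pvBfold (r : List Int) : ∀ (b : Int) (s : List Int), s.Pairwise (· ≤ ·) → 0 ≤ b →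
    (r.foldl pvStep (b, s)).1 = (pvCandsR r s).foldl max b := by
  induction r with
  | nil => intros; rfl
  | cons x r ih =>
      intro b s hs hb
      rw [List.foldl_cons, pvCandsR, List.foldl_cons]
      have hbl := pvBL_cnt s x hs
      have hcnt_le : s.countP (fun y => decide (y < x)) ≤ s.length := List.countP_le_length
      have hstep : pvStep (b, s) x
          = (max b (pvCand x s),
             s.take (s.countP (fun y => decide (y < x))) ++
               x :: s.drop (s.countP (fun y => decide (y < x)))) := by
        unfold pvStep
        simp only [hbl]
        congr 1
        · unfold pvCand
          by_cases hx : x = 0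
          · simp [hx, max_eq_left hb]
          · simp only [hx, ne_eq, not_false_eq_true, true_and]
            rcases le_or_gt ((s.countP (fun y => decide (y < x)) : Nat) : Int) b with h | h
            · rw [if_neg (by omega)]; simp; omega
            · rw [if_pos h]; simp; omega
        · exact PySem.List.insert_natCast s _ x hcnt_le
      rw [hstep, ih _ _ (pvInsert_sorted x s hs) (le_max_of_le_left hb)]
      rw [pvCandsR_perm r (pvInsert_perm x s _)]

-- a running max does not depend on the processing order
lemma pvFoldl_max_reverse (l : List Int) (b : Int) :
    l.reverse.foldl max b = l.foldl max b :=
  (List.reverse_perm l).foldl_eq b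

-- ===== VERDICT (by name: the statement is the Claim_ definition above) =====
theorem check_gravity_spec : Claim_equal_check_gravity := by
  intro numbers _
  unfold Spec_check_gravity check_gravity check_gravity_alt
  have hA := pvOuterA numbers [] 0 le_rfl
  simp only [List.length_nil, Nat.cast_zero, List.nil_append, zero_add] at hA
  rw [hA]
  rw [pvBfold numbers.reverse 0 [] (by simp) le_rfl]
  rw [pvCandsR_reverse numbers []]
  rw [pvFoldl_max_reverse]
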